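-- pv_equiv track=rewrite | github.com/youjeong-choi/python-coding-test | queue_250319.py | solution
-- ===== SOURCE A (Python) =====
-- import math
--
-- def solution(progresses, speeds):
--     answer = []
--     days = []
--     # 각각의 작업에 대해서 며칠이 지나야 진도 100%가 되는지 일수 계산
--     for i, p in enumerate(progresses):
--         days.append(math.ceil((100 - p) / speeds[i]))
--
--     # 완성 일수 리스트에 대해서 맨 처음 값을 기준점으로 잡기
--     release = days[0]
--     count = 0
--     # 기준점보다 작거나 같은 값에 대해서는 count + 1하고 큰 값이 나오면 기준점을 바꾸고, count 값을 answer에 추가 후 count도 리셋.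
--     # 시간복잡도는 N = len(progresses), O(N)
--     for d in days:
--         if d <= release:
--             count += 1
--         else:
--             answer.append(count)
--             release = d
--             count = 1
--
--     # 처리하지 않는 마지막 원소 append
--     answer.append(count)
--     return answer
-- ===== SOURCE B (Python) =====
-- import math
-- from collections import deque
--
--
-- def solution(progresses, speeds):
--     days = [math.ceil((100 - p) / speeds[i]) for i, p in enumerate(progresses)]
--     q = deque(days)
--     answer = []
--     while q:
--         leader = q.popleft()
--         count = 1
--         while q and q[0] <= leader:
--             q.popleft()
--             count += 1
--         answer.append(count)
--     return answer
-- ===== Notes on version B (the rewrite author's own statement) =====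
-- stated objective: idiomatic
-- what changed: Replaces A's single accumulator pass (release/count state threaded through one for-loop plus a trailing append) by consume-from-front grouping on a deque: pop a group leader, inner-while pops all following days <= leader, append the group size.
import Mathlib
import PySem

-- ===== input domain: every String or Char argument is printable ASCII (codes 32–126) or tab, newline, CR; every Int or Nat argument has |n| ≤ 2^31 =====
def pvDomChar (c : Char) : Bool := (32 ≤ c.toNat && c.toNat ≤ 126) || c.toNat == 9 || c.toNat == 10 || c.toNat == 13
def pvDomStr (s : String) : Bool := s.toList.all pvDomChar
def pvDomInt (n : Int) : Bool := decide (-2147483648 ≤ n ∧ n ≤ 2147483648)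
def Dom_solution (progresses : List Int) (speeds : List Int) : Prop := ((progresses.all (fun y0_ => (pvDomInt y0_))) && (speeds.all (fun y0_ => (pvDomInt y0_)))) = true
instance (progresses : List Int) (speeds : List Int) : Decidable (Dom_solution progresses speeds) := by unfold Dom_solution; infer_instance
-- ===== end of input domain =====

-- B replaces A's accumulator pass (release/count threaded through one for-loop) by
-- consume-from-front grouping on a deque: pop a leader, pop all following days <= leader, record the group size.


-- ===== PORT A =====
-- math.ceil((100 - p) / s) : exact on the domain (|100 - p|, |s| ≤ 2^31 + 100 < 2^53, so the
-- float quotient's ceiling equals the exact rational ceiling, i.e. -((-(100 - p)) // s)).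
def pyCeilDiv (a b : Int) : Int := -(PySem.Int.floordiv (-a) b)

def solution (progresses : List Int) (speeds : List Int) : List Int :=
  let days := (PySem.List.enumerate progresses).foldl
    (fun days ip => days ++ [pyCeilDiv (100 - ip.2) (PySem.List.pyGetD speeds ip.1 0)]) []
  match days with
  | [] => []   -- Python raises IndexError here (release = days[0]); excluded by Pre_solution
  | d0 :: _ =>
    let st := days.foldl
      (fun (st : List Int × Int × Int) d =>
        if d ≤ st.2.1 then (st.1, st.2.1, st.2.2 + 1) else (st.1 ++ [st.2.2], d, 1))
      ([], d0, 0)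
    st.1 ++ [st.2.2]

-- ===== PORT B =====
-- the inner while: pops the leading run of days ≤ leader, returning (run length, remaining deque)
def eatLe (leader : Int) : List Int → Int × List Int
  | [] => (0, [])
  | d :: rest =>
    if d ≤ leader then
      let r := eatLe leader rest
      (r.1 + 1, r.2)
    else (0, d :: rest)

theorem eatLe_length (l : Int) (xs : List Int) : (eatLe l xs).2.length ≤ xs.length := by
  induction xs with
  | nil => simp [eatLe]
  | cons d rest ih =>
    simp only [eatLe]
    split
    · simpa using Nat.le_succ_of_le ih
    · simp

-- the outer while over the deque
def grp (q : List Int) : List Int :=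
  match q with
  | [] => []
  | leader :: rest =>
    let r := eatLe leader rest
    (1 + r.1) :: grp r.2
termination_by q.length
decreasing_by simpa using Nat.lt_succ_of_le (eatLe_length leader rest)

def solution_alt (progresses : List Int) (speeds : List Int) : List Int :=
  let days := (PySem.List.enumerate progresses).map
    (fun ip => pyCeilDiv (100 - ip.2) (PySem.List.pyGetD speeds ip.1 0))
  grp days

-- ===== PRECONDITION & SPEC =====
-- Exactly the inputs on which A returns: a nonempty progresses (else days[0] raises IndexError),
-- speeds long enough for every index used (else IndexError), and no used speed 0 (else ZeroDivisionError).
def Pre_solution (progresses : List Int) (speeds : List Int) : Prop :=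
  progresses ≠ [] ∧ progresses.length ≤ speeds.length ∧
    ∀ s ∈ speeds.take progresses.length, s ≠ 0
instance (progresses : List Int) (speeds : List Int) : Decidable (Pre_solution progresses speeds) := by
  unfold Pre_solution; infer_instance

def pvWitness_solution : List Int × List Int := ([30, 55, 95], [1, 30, 5])

def Spec_solution (progresses : List Int) (speeds : List Int) (out : List Int) : Prop :=
  out = solution_alt progresses speeds
instance (progresses : List Int) (speeds : List Int) (out : List Int) : Decidable (Spec_solution progresses speeds out) := by
  unfold Spec_solution; infer_instance

-- ===== CLAIM (what is proved, stated in full; the proofs are below) =====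
def Claim_equal_solution : Prop := ∀ (progresses : List Int) (speeds : List Int), Dom_solution progresses speeds → Pre_solution progresses speeds → Spec_solution progresses speeds (solution progresses speeds)

-- ===== LEMMAS AND PROOFS =====

theorem grp_cons (leader : Int) (rest : List Int) :
    grp (leader :: rest) = (1 + (eatLe leader rest).1) :: grp (eatLe leader rest).2 := by
  rw [grp]

-- A's loop, started with accumulator (ans, r, c), finishes to ans followed by B's grouping of the rest.
theorem fold_eq_grp (ds ans : List Int) (r c : Int) :
    (ds.foldl
        (fun (st : List Int × Int × Int) d =>
          if d ≤ st.2.1 then (st.1, st.2.1, st.2.2 + 1) else (st.1 ++ [st.2.2], d, 1))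
        (ans, r, c)).1 ++
      [(ds.foldl
          (fun (st : List Int × Int × Int) d =>
            if d ≤ st.2.1 then (st.1, st.2.1, st.2.2 + 1) else (st.1 ++ [st.2.2], d, 1))
          (ans, r, c)).2.2] = ans ++ (c + (eatLe r ds).1) :: grp (eatLe r ds).2 := by
  induction ds generalizing ans r c with
  | nil => simp [eatLe, grp]
  | cons d ds ih =>
    simp only [List.foldl_cons, eatLe]
    by_cases h : d ≤ r
    · simp only [if_pos h]
      rw [ih]
      have : c + 1 + (eatLe r ds).1 = c + ((eatLe r ds).1 + 1) := by ring
      simp [this]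
    · simp only [if_neg h]
      rw [ih, grp_cons]
      simp

theorem A_group_eq_grp (ds : List Int) :
    (match ds with
      | [] => ([] : List Int)
      | d0 :: _ =>
        (ds.foldl
            (fun (st : List Int × Int × Int) d =>
              if d ≤ st.2.1 then (st.1, st.2.1, st.2.2 + 1) else (st.1 ++ [st.2.2], d, 1))
            ([], d0, 0)).1 ++
          [(ds.foldl
              (fun (st : List Int × Int × Int) d =>
                if d ≤ st.2.1 then (st.1, st.2.1, st.2.2 + 1) else (st.1 ++ [st.2.2], d, 1))
              ([], d0, 0)).2.2]) = grp ds := by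
  cases ds with
  | nil => rw [grp]
  | cons d0 rest =>
    simp only [List.foldl_cons, le_refl, if_true]
    rw [fold_eq_grp, grp_cons]
    norm_num

-- ===== VERDICT (by name: the statement is the Claim_ definition above) =====
theorem solution_spec : Claim_equal_solution := by
  intro progresses speeds _ _
  unfold Spec_solution solution solution_alt
  rw [PySem.List.foldl_append_singleton_eq_map, List.nil_append]
  exact A_group_eq_grp _
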